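-- pv_equiv track=rewrite | github.com/trendels/aoc2020 | day16/day16.py | get_validity
-- ===== SOURCE A (Python) =====
-- def get_validity(ticket, rules):
--     is_valid, error = True, 0
--     for n in ticket:
--         valid = any(r for r in rules.values() if n in r[0] or n in r[1])
--         if not valid:
--             is_valid = False
--             error += n
--     return is_valid, error
-- ===== SOURCE B (Python) =====
-- def get_validity(ticket, rules):
--     # Flatten all rule values into sorted distinct numbers, merge consecutive
--     # runs into disjoint half-open intervals, then binary-search per ticket number.
--     vals = sorted({n for r in rules.values() for lst in r for n in lst})
--     intervals = []
--     for v in vals: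
--         if intervals and v == intervals[-1][1]:
--             intervals[-1] = (intervals[-1][0], v + 1)
--         else:
--             intervals.append((v, v + 1))
--     starts = [iv[0] for iv in intervals]
--
--     def covered(n):
--         # rightmost insertion point: number of starts <= n
--         lo, hi = 0, len(starts)
--         while lo < hi:
--             mid = (lo + hi) // 2
--             if starts[mid] <= n:
--                 lo = mid + 1
--             else:
--                 hi = mid
--         return lo > 0 and n < intervals[lo - 1][1]
--
--     bad = [n for n in ticket if not covered(n)]
--     return (not bad, sum(bad))
-- ===== Notes on version B (the rewrite author's own statement) =====
-- stated objective: faster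
-- what changed: B flattens all rule values once into sorted disjoint merged intervals and decides each ticket number by binary search over interval starts, collecting the invalid numbers in a staged filter/sum instead of A's per-number scan of every rule.
import Mathlib
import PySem

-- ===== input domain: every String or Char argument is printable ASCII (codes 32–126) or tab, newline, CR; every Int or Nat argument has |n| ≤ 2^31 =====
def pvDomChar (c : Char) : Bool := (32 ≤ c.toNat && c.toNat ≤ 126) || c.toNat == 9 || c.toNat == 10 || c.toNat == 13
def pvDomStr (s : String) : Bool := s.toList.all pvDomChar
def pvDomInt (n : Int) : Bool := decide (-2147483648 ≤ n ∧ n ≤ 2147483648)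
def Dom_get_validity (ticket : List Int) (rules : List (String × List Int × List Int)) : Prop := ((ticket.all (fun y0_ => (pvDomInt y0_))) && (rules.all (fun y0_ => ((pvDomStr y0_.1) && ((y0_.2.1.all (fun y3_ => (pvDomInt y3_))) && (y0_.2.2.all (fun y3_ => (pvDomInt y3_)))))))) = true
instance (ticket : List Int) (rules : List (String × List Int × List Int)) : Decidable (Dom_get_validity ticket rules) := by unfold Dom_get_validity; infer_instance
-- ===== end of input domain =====

-- B flattens all rule values into sorted disjoint intervals once and binary-searches
-- per ticket number, instead of A's scan of every rule per number (objective: faster).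

-- ===== PORT A =====
def get_validity (ticket : List Int) (rules : List (String × List Int × List Int)) : Bool × Int :=
  ticket.foldl (fun st n =>
    let valid := ((PySem.Dict.ofList rules).values).any
      (fun r => r.1.contains n || r.2.contains n)
    if !valid then (false, st.2 + n) else st) (true, 0)

-- ===== PORT B =====
-- the body of Source B's merge loop: extend the last interval or append a fresh one
def pvMergeStep (acc : List (Int × Int)) (v : Int) : List (Int × Int) :=
  match acc.getLast? with
  | some last =>
      if v = last.2 then acc.dropLast ++ [(last.1, v + 1)]
      else acc ++ [(v, v + 1)]
  | none => [(v, v + 1)]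

-- Source B's hand-written while loop (rightmost insertion point); starts[mid] is always
-- in range (lo < hi ≤ |starts|), so getD's default is never read
def pvBSearch (starts : List Int) (n : Int) (lo hi : Nat) : Nat :=
  if h : lo < hi then
    let mid := (lo + hi) / 2
    if starts.getD mid 0 ≤ n then pvBSearch starts n (mid + 1) hi
    else pvBSearch starts n lo mid
  else lo
termination_by hi - lo
decreasing_by all_goals omega

def get_validity_alt (ticket : List Int) (rules : List (String × List Int × List Int)) : Bool × Int :=
  let vals := PySem.List.sorted
    (PySem.Set.ofList (((PySem.Dict.ofList rules).values).flatMap (fun r => r.1 ++ r.2)))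
    (fun x => x) false
  let intervals := vals.foldl pvMergeStep []
  let starts := intervals.map (fun iv => iv.1)
  let covered := fun n =>
    let lo := pvBSearch starts n 0 starts.length
    decide (0 < lo) && decide (n < (intervals.getD (lo - 1) (0, 0)).2)
  let bad := ticket.filter (fun n => !covered n)
  (bad.isEmpty, bad.sum)

-- ===== PRECONDITION & SPEC =====
def Spec_get_validity (ticket : List Int) (rules : List (String × List Int × List Int)) (out : Bool × Int) : Prop := out = get_validity_alt ticket rules
instance (ticket : List Int) (rules : List (String × List Int × List Int)) (out : Bool × Int) : Decidable (Spec_get_validity ticket rules out) := by unfold Spec_get_validity; infer_instance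

-- ===== CLAIM (what is proved, stated in full; the proofs are below) =====
def Claim_equal_get_validity : Prop := ∀ (ticket : List Int) (rules : List (String × List Int × List Int)), Dom_get_validity ticket rules → Spec_get_validity ticket rules (get_validity ticket rules)

-- ===== LEMMAS AND PROOFS =====

-- intervals are proper and strictly separated
def pvGood (l : List (Int × Int)) : Prop :=
  l.IsChain (fun p q => p.2 < q.1) ∧ ∀ iv ∈ l, iv.1 < iv.2

-- n is covered by some interval of l
def pvCov (l : List (Int × Int)) (n : Int) : Prop :=
  ∃ iv ∈ l, iv.1 ≤ n ∧ n < iv.2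

theorem pvMergeStep_last (acc : List (Int × Int)) (v : Int) :
    ∃ a, (pvMergeStep acc v).getLast? = some (a, v + 1) := by
  unfold pvMergeStep
  cases h : acc.getLast? with
  | none => exact ⟨v, rfl⟩
  | some last =>
    by_cases hv : v = last.2 <;> simp [hv]

-- decompose a list by its last element
theorem pv_last_decomp (acc : List (Int × Int)) (last : Int × Int)
    (h : acc.getLast? = some last) : acc = acc.dropLast ++ [last] := by
  have hne : acc ≠ [] := by intro hnil; rw [hnil] at h; simp at h
  have h2 := List.getLast?_eq_some_getLast hne
  rw [h] at h2
  have h3 : last = acc.getLast hne := by injection h2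
  rw [h3]
  exact (List.dropLast_concat_getLast hne).symm

theorem pvMergeStep_good (acc : List (Int × Int)) (v : Int)
    (hg : pvGood acc)
    (hlink : ∀ last ∈ acc.getLast?, last.2 ≤ v) :
    pvGood (pvMergeStep acc v) := by
  unfold pvMergeStep
  cases h : acc.getLast? with
  | none => simp [pvGood]
  | some last =>
    obtain ⟨a, b⟩ := last
    dsimp only
    obtain ⟨F, hF⟩ : ∃ F, acc = F ++ [(a, b)] := ⟨acc.dropLast, pv_last_decomp acc (a, b) h⟩
    subst hF
    have hble : b ≤ v := by simpa using hlink (a, b) h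
    obtain ⟨hchain, hprop⟩ := hg
    rw [List.isChain_append] at hchain
    have hab : a < b := by simpa using hprop (a, b) (List.mem_append_right _ (by simp))
    simp only [List.dropLast_concat]
    by_cases hv : v = b
    · rw [if_pos hv]
      constructor
      · rw [List.isChain_append]
        refine ⟨hchain.1, by simp, ?_⟩
        intro x hx y hy
        simp at hy
        rw [← hy]
        exact hchain.2.2 x hx (a, b) (by simp)
      · intro iv hiv
        rcases List.mem_append.mp hiv with hm | hm
        · exact hprop iv (List.mem_append_left _ hm)
        · have : iv = (a, v + 1) := by simpa using hm
          subst this; simp; omega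
    · rw [if_neg hv]
      have hbv : b < v := lt_of_le_of_ne hble (fun e => hv e.symm)
      constructor
      · rw [List.append_assoc, List.isChain_append]
        refine ⟨hchain.1, ?_, ?_⟩
        · rw [List.isChain_append]
          refine ⟨by simp, by simp, ?_⟩
          intro x hx y hy
          simp at hx hy
          rw [← hx, ← hy]
          simpa using hbv
        · intro x hx y hy
          simp at hy
          rw [← hy]
          exact hchain.2.2 x hx (a, b) (by simp)
      · intro iv hiv
        rw [List.append_assoc] at hiv
        rcases List.mem_append.mp hiv with hm | hm
        · exact hprop iv (List.mem_append_left _ hm)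
        · simp at hm
          rcases hm with hm | hm
          · rw [hm]; exact hab
          · rw [hm]; simp

theorem pvMergeStep_cov (acc : List (Int × Int)) (v : Int)
    (hg : pvGood acc)
    (hlink : ∀ last ∈ acc.getLast?, last.2 ≤ v) (n : Int) :
    pvCov (pvMergeStep acc v) n ↔ pvCov acc n ∨ n = v := by
  unfold pvMergeStep
  cases h : acc.getLast? with
  | none =>
    have hnil : acc = [] := List.getLast?_eq_none_iff.mp h
    subst hnil
    simp [pvCov]
    omega
  | some last =>
    obtain ⟨a, b⟩ := last
    dsimp only
    obtain ⟨F, hF⟩ : ∃ F, acc = F ++ [(a, b)] := ⟨acc.dropLast, pv_last_decomp acc (a, b) h⟩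
    subst hF
    have hble : b ≤ v := by simpa using hlink (a, b) h
    have hab : a < b := by simpa using hg.2 (a, b) (List.mem_append_right _ (by simp))
    simp only [List.dropLast_concat]
    by_cases hv : v = b
    · rw [if_pos hv]
      subst hv
      simp only [pvCov, List.mem_append, List.mem_singleton]
      constructor
      · rintro ⟨iv, hm | hm, hin⟩
        · exact Or.inl ⟨iv, Or.inl hm, hin⟩
        · rw [hm] at hin
          simp at hin
          by_cases hnv : n = v
          · exact Or.inr hnv
          · exact Or.inl ⟨(a, v), Or.inr rfl, by simp; omega⟩
      · rintro (⟨iv, hm | hm, hin⟩ | hnv)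
        · exact ⟨iv, Or.inl hm, hin⟩
        · rw [hm] at hin; simp at hin
          exact ⟨(a, v + 1), Or.inr rfl, by simp; omega⟩
        · exact ⟨(a, v + 1), Or.inr rfl, by simp; omega⟩
    · rw [if_neg hv]
      simp only [pvCov, List.mem_append, List.mem_singleton]
      constructor
      · rintro ⟨iv, hm | hm, hin⟩
        · exact Or.inl ⟨iv, hm, hin⟩
        · rw [hm] at hin; simp at hin; omega
      · rintro (⟨iv, hm, hin⟩ | hnv)
        · exact ⟨iv, Or.inl hm, hin⟩
        · exact ⟨(v, v + 1), Or.inr rfl, by simp; omega⟩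

-- folding the merge step over a strictly increasing list yields good intervals
-- covering exactly its elements
theorem pvMerge_fold (vals : List Int) (acc : List (Int × Int))
    (hv : vals.IsChain (· < ·))
    (hg : pvGood acc)
    (hlink : ∀ last ∈ acc.getLast?, ∀ v ∈ vals.head?, last.2 ≤ v) :
    pvGood (vals.foldl pvMergeStep acc) ∧
      ∀ n, pvCov (vals.foldl pvMergeStep acc) n ↔ pvCov acc n ∨ n ∈ vals := by
  induction vals generalizing acc with
  | nil => simpa using hg
  | cons v vs ih =>
    have hlink' : ∀ last ∈ acc.getLast?, last.2 ≤ v := by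
      intro last hl
      exact hlink last hl v (by simp)
    have hg' := pvMergeStep_good acc v hg hlink'
    have hcov' := pvMergeStep_cov acc v hg hlink'
    have hv' : vs.IsChain (· < ·) := (List.isChain_cons'.mp hv).2
    have hlink'' : ∀ last ∈ (pvMergeStep acc v).getLast?, ∀ w ∈ vs.head?, last.2 ≤ w := by
      intro last hl w hw
      obtain ⟨a, hlast⟩ := pvMergeStep_last acc v
      rw [hlast] at hl
      simp at hl
      have hvw : v < w := (List.isChain_cons'.mp hv).1 w hw
      rw [← hl]
      omega
    obtain ⟨hG, hC⟩ := ih (pvMergeStep acc v) hv' hg' hlink''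
    refine ⟨hG, ?_⟩
    intro n
    rw [List.foldl_cons] at *
    rw [hC n, hcov' n]
    simp [or_assoc]

-- specification of Source B's binary search: it returns the number of starts ≤ n
theorem pvBSearch_spec (starts : List Int) (n : Int)
    (hs : starts.Pairwise (· ≤ ·)) (lo hi : Nat)
    (hlohi : lo ≤ hi)
    (hhi : hi ≤ starts.length)
    (hlo : ∀ i (h : i < starts.length), i < lo → starts[i] ≤ n)
    (hhi2 : ∀ i (h : i < starts.length), hi ≤ i → n < starts[i]) :
    lo ≤ pvBSearch starts n lo hi ∧ pvBSearch starts n lo hi ≤ hi ∧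
      (∀ i (h : i < starts.length), i < pvBSearch starts n lo hi → starts[i] ≤ n) ∧
      (∀ i (h : i < starts.length), pvBSearch starts n lo hi ≤ i → n < starts[i]) := by
  fun_induction pvBSearch starts n lo hi with
  | case1 lo hi h mid hle ih =>
    have hmid : mid < starts.length := by omega
    have hmidle : starts[mid] ≤ n := by
      rw [List.getD_eq_getElem starts 0 hmid] at hle
      exact hle
    have hpair := List.pairwise_iff_getElem.mp hs
    have hlo' : ∀ i (hil : i < starts.length), i < mid + 1 → starts[i] ≤ n := by
      intro i hil hi'
      rcases Nat.lt_or_ge i mid with hc | hc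
      · exact le_trans (hpair i mid hil hmid hc) hmidle
      · have : i = mid := by omega
        subst this; exact hmidle
    obtain ⟨h1, h2, h3, h4⟩ := ih (by omega) hhi hlo' hhi2
    exact ⟨by omega, by omega, h3, h4⟩
  | case2 lo hi h mid hle ih =>
    have hmid : mid < starts.length := by omega
    have hmidgt : n < starts[mid] := by
      rw [List.getD_eq_getElem starts 0 hmid] at hle
      omega
    have hpair := List.pairwise_iff_getElem.mp hs
    have hhi2' : ∀ i (hil : i < starts.length), mid ≤ i → n < starts[i] := by
      intro i hil hi'
      rcases Nat.lt_or_ge mid i with hc | hc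
      · exact lt_of_lt_of_le hmidgt (hpair mid i hmid hil hc)
      · have : i = mid := by omega
        subst this; exact hmidgt
    obtain ⟨h1, h2, h3, h4⟩ := ih (by omega) (by omega) hlo hhi2'
    exact ⟨by omega, by omega, h3, h4⟩
  | case3 lo hi h =>
    refine ⟨le_refl _, by omega, hlo, ?_⟩
    intro i hil hi'
    exact hhi2 i hil (by omega)

-- strict separation of any two intervals of a good list
theorem pvGood_sep (l : List (Int × Int)) (hg : pvGood l) :
    ∀ i j (hi : i < l.length) (hj : j < l.length), i < j → l[i].2 < l[j].1 := by
  induction l with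
  | nil => intro i j hi; simp at hi
  | cons p rest ih =>
    intro i j hi hj hij
    obtain ⟨hchain, hmem⟩ := hg
    have hrest : pvGood rest :=
      ⟨(List.isChain_cons'.mp hchain).2, fun iv h => hmem iv (List.mem_cons_of_mem _ h)⟩
    match i, j with
    | 0, j + 1 =>
      have hjr : j < rest.length := by simpa using hj
      have h0r : 0 < rest.length := by omega
      have hhead : p.2 < rest[0].1 := by
        have := (List.isChain_cons'.mp hchain).1 rest[0]
        apply this
        rw [List.head?_eq_getElem?, List.getElem?_eq_getElem h0r]
        rfl
      simp only [List.getElem_cons_succ]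
      rcases Nat.eq_zero_or_pos j with h0 | h0
      · subst h0; simpa using hhead
      · have h02 : rest[0].1 < rest[0].2 := hrest.2 rest[0] (List.getElem_mem h0r)
        have := ih hrest 0 j h0r hjr h0
        simp at hhead ⊢
        omega
    | i + 1, j + 1 =>
      simp only [List.getElem_cons_succ]
      exact ih hrest i j (by simpa using hi) (by simpa using hj) (by omega)

-- Source B's covered test decides membership in the union of good intervals
theorem pvCovered_correct (intervals : List (Int × Int)) (hg : pvGood intervals) (n : Int) :
    ((decide (0 < pvBSearch (intervals.map (fun iv => iv.1)) n 0 (intervals.map (fun iv => iv.1)).length) &&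
      decide (n < (intervals.getD (pvBSearch (intervals.map (fun iv => iv.1)) n 0 (intervals.map (fun iv => iv.1)).length - 1) (0, 0)).2)) = true)
      ↔ pvCov intervals n := by
  set starts := intervals.map (fun iv => iv.1) with hstarts
  have hlen : starts.length = intervals.length := by simp [hstarts]
  have hsget : ∀ i (h : i < intervals.length), starts[i]'(by omega) = intervals[i].1 := by
    intro i h; simp [hstarts]
  have hsep := pvGood_sep intervals hg
  have hpair : starts.Pairwise (· ≤ ·) := by
    rw [List.pairwise_iff_getElem]
    intro i j hi hj hij
    rw [hsget i (by omega), hsget j (by omega)]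
    have h1 := hsep i j (by omega) (by omega) hij
    have h2 := hg.2 intervals[i] (List.getElem_mem (by omega))
    omega
  obtain ⟨hr1, hr2, hr3, hr4⟩ := pvBSearch_spec starts n hpair 0 starts.length (by omega) (le_refl _)
    (by intro i h h'; omega) (by intro i h h'; omega)
  set r := pvBSearch starts n 0 starts.length with hr
  constructor
  · intro hcov
    simp only [Bool.and_eq_true, decide_eq_true_eq] at hcov
    obtain ⟨h0, hlt⟩ := hcov
    have hr1lt : r - 1 < intervals.length := by omega
    rw [List.getD_eq_getElem intervals (0, 0) hr1lt] at hlt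
    refine ⟨intervals[r - 1], List.getElem_mem hr1lt, ?_, hlt⟩
    have := hr3 (r - 1) (by omega) (by omega)
    rw [hsget (r - 1) hr1lt] at this
    exact this
  · rintro ⟨iv, hm, h1, h2⟩
    obtain ⟨j, hj, hje⟩ := List.mem_iff_getElem.mp hm
    have hjr : j < r := by
      by_contra hc
      have := hr4 j (by omega) (by omega)
      rw [hsget j hj, hje] at this
      omega
    have h0 : 0 < r := by omega
    have hr1lt : r - 1 < intervals.length := by omega
    simp only [Bool.and_eq_true, decide_eq_true_eq]
    refine ⟨h0, ?_⟩
    rw [List.getD_eq_getElem intervals (0, 0) hr1lt]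
    rcases Nat.lt_or_ge j (r - 1) with hc | hc
    · exfalso
      have hs1 := hsep j (r - 1) hj hr1lt hc
      have hs2 := hr3 (r - 1) (by omega) (by omega)
      rw [hsget (r - 1) hr1lt] at hs2
      rw [hje] at hs1
      omega
    · have : j = r - 1 := by omega
      subst this
      rw [hje]
      exact h2

-- A's loop in closed form: flag = all valid, error = sum of the invalid numbers
theorem pvFoldA (p : Int → Bool) (t : List Int) (st : Bool × Int) :
    t.foldl (fun st n => if !(p n) then (false, st.2 + n) else st) st
      = (st.1 && t.all p, st.2 + (t.filter (fun n => !(p n))).sum) := by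
  induction t generalizing st with
  | nil => simp
  | cons x t ih =>
    cases hp : p x with
    | true =>
      rw [List.foldl_cons, if_neg (by simp [hp]), ih st]
      simp [hp]
    | false =>
      rw [List.foldl_cons, if_pos (by simp [hp]), ih]
      simp [hp, add_assoc]

-- ===== VERDICT (by name: the statement is the Claim_ definition above) =====
theorem get_validity_spec : Claim_equal_get_validity := by
  intro ticket rules _
  unfold Spec_get_validity get_validity get_validity_alt
  dsimp only
  set vals := PySem.List.sorted
    (PySem.Set.ofList (((PySem.Dict.ofList rules).values).flatMap (fun r => r.1 ++ r.2)))
    (fun x => x) false with hvals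
  set intervals := vals.foldl pvMergeStep [] with hintervals
  have hchainv : vals.IsChain (· < ·) := by
    have hle : vals.Pairwise (· ≤ ·) := by
      simpa using PySem.List.sorted_pairwise (xs := PySem.Set.ofList (((PySem.Dict.ofList rules).values).flatMap (fun r => r.1 ++ r.2))) (key := fun x => x)
    have hnd : vals.Nodup := by
      have hperm := PySem.List.sorted_perm (xs := PySem.Set.ofList (((PySem.Dict.ofList rules).values).flatMap (fun r => r.1 ++ r.2))) (key := fun x => x) (rev := false)
      exact hperm.nodup_iff.mpr (PySem.Set.nodup_ofList _)
    have hnd' : vals.Pairwise (fun a b => a ≠ b) := hnd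
    have hlt : vals.Pairwise (· < ·) := by
      rw [List.pairwise_iff_getElem] at hle hnd' ⊢
      intro i j hi hj hij
      exact lt_of_le_of_ne (hle i j hi hj hij) (hnd' i j hi hj hij)
    exact List.isChain_iff_pairwise.mpr hlt
  obtain ⟨hG, hC⟩ := pvMerge_fold vals [] hchainv ⟨by simp, by simp⟩ (by simp)
  have hcov : ∀ n, pvCov intervals n ↔ n ∈ vals := by
    intro n
    rw [← hintervals] at hC
    rw [hC n]
    simp [pvCov]
  have hmemv : ∀ n : Int, (n ∈ vals) ↔
      (((PySem.Dict.ofList rules).values).any (fun r => r.1.contains n || r.2.contains n) = true) := by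
    intro n
    rw [hvals]
    simp [PySem.List.mem_sorted, PySem.Set.mem_ofList, List.mem_flatMap, List.any_eq_true]
  have hpt : ∀ n : Int,
      (decide (0 < pvBSearch (intervals.map (fun iv => iv.1)) n 0 (intervals.map (fun iv => iv.1)).length) &&
        decide (n < (intervals.getD (pvBSearch (intervals.map (fun iv => iv.1)) n 0 (intervals.map (fun iv => iv.1)).length - 1) (0, 0)).2))
      = ((PySem.Dict.ofList rules).values).any (fun r => r.1.contains n || r.2.contains n) := by
    intro n
    rw [Bool.eq_iff_iff, pvCovered_correct intervals hG n, hcov n, hmemv n]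
  have hstep : ∀ (st : Bool × Int) (n : Int), n ∈ ticket →
      (if !(((PySem.Dict.ofList rules).values).any (fun r => r.1.contains n || r.2.contains n)) then (false, st.2 + n) else st)
      = (if !(decide (0 < pvBSearch (intervals.map (fun iv => iv.1)) n 0 (intervals.map (fun iv => iv.1)).length) &&
          decide (n < (intervals.getD (pvBSearch (intervals.map (fun iv => iv.1)) n 0 (intervals.map (fun iv => iv.1)).length - 1) (0, 0)).2)) then (false, st.2 + n) else st) := by
    intro st n _
    rw [hpt n]
  rw [PySem.List.foldl_congr_mem ticket _ _ _ hstep]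
  rw [pvFoldA (fun n =>
    decide (0 < pvBSearch (intervals.map (fun iv => iv.1)) n 0 (intervals.map (fun iv => iv.1)).length) &&
    decide (n < (intervals.getD (pvBSearch (intervals.map (fun iv => iv.1)) n 0 (intervals.map (fun iv => iv.1)).length - 1) (0, 0)).2)) ticket (true, 0)]
  rw [Prod.mk.injEq]
  refine ⟨?_, by rw [zero_add]⟩
  rw [Bool.true_and, Bool.eq_iff_iff]
  simp only [List.all_eq_true, List.isEmpty_iff, List.filter_eq_nil_iff,
    Bool.and_eq_true, Bool.not_eq_true', Bool.and_eq_false_iff, decide_eq_true_eq,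
    decide_eq_false_iff_not, not_lt, Nat.le_zero]
  constructor <;> intro h x hx <;> have hh := h x hx <;> omega
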